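-- pv_equiv track=rewrite | github.com/dinobby/MAGDi | utils.py | prepare_contrastive_samples
-- ===== SOURCE A (Python) =====
-- def prepare_contrastive_samples(samples, labels):
--     """
--     Prepare contrastive learning samples, maximizing the usage by replicating the minority set.
--
--     Args:
--     samples (list): The list of samples.
--     labels (list): The list of labels corresponding to the samples.
--
--     Returns:
--     (list, list): Tuple of two lists - positive samples and negative samples.
--     """
--     if len(samples) != len(labels):
--         raise ValueError("Samples and labels must be of the same length.")
--
--     positive_samples = [sample for sample, label in zip(samples, labels) if label == 1]
--     negative_samples = [sample for sample, label in zip(samples, labels) if label == 0]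
--
--     if len(negative_samples) == 0:
--         negative_samples = ["NA"] # padding for negatives
--
--     if len(positive_samples) == 0:
--         return None
--
--     if len(positive_samples) > len(negative_samples):
--         negative_samples = (negative_samples * ((len(positive_samples) // len(negative_samples)) + 1))[:len(positive_samples)]
--     elif len(negative_samples) > len(positive_samples):
--         positive_samples = (positive_samples * ((len(negative_samples) // len(positive_samples)) + 1))[:len(negative_samples)]
--
--     return positive_samples, negative_samples
-- ===== SOURCE B (Python) =====
-- def prepare_contrastive_samples(samples, labels):
--     if len(samples) != len(labels):
--         raise ValueError("Samples and labels must be of the same length.")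
--     positive_samples, negative_samples = [], []
--     for sample, label in zip(samples, labels):
--         if label == 1:
--             positive_samples.append(sample)
--         elif label == 0:
--             negative_samples.append(sample)
--     if not negative_samples:
--         negative_samples = ["NA"]  # padding for negatives
--     if not positive_samples:
--         return None
--     n = max(len(positive_samples), len(negative_samples))
--     # grow the shorter side by repeated doubling, then truncate to n
--     while len(positive_samples) < n:
--         positive_samples = positive_samples + positive_samples
--     while len(negative_samples) < n:
--         negative_samples = negative_samples + negative_samples
--     return positive_samples[:n], negative_samples[:n]
-- ===== Notes on version B (the rewrite author's own statement) =====
-- stated objective: alternative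
-- what changed: The two zip/filter comprehensions become one single-pass partition loop with two accumulators, and the multiply-then-slice replication branches become symmetric exponential doubling (while len(lst) < n: lst = lst + lst) followed by truncation to n.
import Mathlib
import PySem

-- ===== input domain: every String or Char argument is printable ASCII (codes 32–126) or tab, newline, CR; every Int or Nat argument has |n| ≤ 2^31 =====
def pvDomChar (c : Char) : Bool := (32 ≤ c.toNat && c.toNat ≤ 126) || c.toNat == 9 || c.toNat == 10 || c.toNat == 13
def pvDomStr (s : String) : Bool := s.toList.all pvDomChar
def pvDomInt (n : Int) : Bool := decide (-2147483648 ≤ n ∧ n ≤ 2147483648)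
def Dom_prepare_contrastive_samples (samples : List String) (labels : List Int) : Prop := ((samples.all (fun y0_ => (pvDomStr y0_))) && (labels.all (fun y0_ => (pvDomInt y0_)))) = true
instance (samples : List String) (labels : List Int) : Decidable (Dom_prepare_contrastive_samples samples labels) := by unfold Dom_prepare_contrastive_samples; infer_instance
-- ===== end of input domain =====

-- B replaces A's two zip/filter comprehensions with one single-pass partition loop,
-- and A's multiply-and-slice replication with exponential doubling then truncation
-- (objective: alternative).

-- ===== PORT A =====
def prepare_contrastive_samples (samples : List String) (labels : List Int) :
    Option (List String × List String) :=
  if samples.length ≠ labels.length then none  -- Python raises ValueError here; excluded by Pre_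
  else
    let positive_samples := ((samples.zip labels).filter (fun p => p.2 == 1)).map Prod.fst
    let negative_samples0 := ((samples.zip labels).filter (fun p => p.2 == 0)).map Prod.fst
    let negative_samples := if negative_samples0.length = 0 then ["NA"] else negative_samples0
    if positive_samples.length = 0 then none
    else if positive_samples.length > negative_samples.length then
      -- (negative_samples * (len(pos)//len(neg) + 1))[:len(pos)]  (slice bound ≥ 0, so take is exact)
      some (positive_samples,
        ((List.replicate (positive_samples.length / negative_samples.length + 1) negative_samples).flatten).take positive_samples.length)
    else if negative_samples.length > positive_samples.length then
      some (((List.replicate (negative_samples.length / positive_samples.length + 1) positive_samples).flatten).take negative_samples.length,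
        negative_samples)
    else some (positive_samples, negative_samples)

-- ===== PORT B =====
-- 'while len(l) < n: l = l + l' ; the 'l ≠ []' conjunct is only a totality guard:
-- B's code only runs the loop on nonempty lists (both guards have already fired).
def growPCS (n : Nat) (l : List String) : List String :=
  if h : l.length < n ∧ l ≠ [] then growPCS n (l ++ l) else l
termination_by n - l.length
decreasing_by
  have : 0 < l.length := List.length_pos_of_ne_nil h.2
  simp only [List.length_append]
  omega

def prepare_contrastive_samples_alt (samples : List String) (labels : List Int) :
    Option (List String × List String) :=
  if samples.length ≠ labels.length then none  -- Python raises ValueError here; excluded by Pre_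
  else
    -- single-pass partition loop with two accumulators (appends keep order)
    let pq := (samples.zip labels).foldl
      (fun (acc : List String × List String) p =>
        if p.2 == 1 then (acc.1 ++ [p.1], acc.2)
        else if p.2 == 0 then (acc.1, acc.2 ++ [p.1])
        else acc) ([], [])
    let positive_samples := pq.1
    let negative_samples := if pq.2 = [] then ["NA"] else pq.2
    if positive_samples = [] then none
    else
      let n := max positive_samples.length negative_samples.length
      some ((growPCS n positive_samples).take n, (growPCS n negative_samples).take n)

-- ===== PRECONDITION & SPEC =====
-- Pre_ excludes exactly the inputs on which A raises ValueError: mismatched lengths.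
def Pre_prepare_contrastive_samples (samples : List String) (labels : List Int) : Prop :=
  samples.length = labels.length
instance (samples : List String) (labels : List Int) : Decidable (Pre_prepare_contrastive_samples samples labels) := by unfold Pre_prepare_contrastive_samples; infer_instance

def pvWitness_prepare_contrastive_samples : List String × List Int := (["a", "b", "c"], [1, 0, 1])

def Spec_prepare_contrastive_samples (samples : List String) (labels : List Int) (out : Option (List String × List String)) : Prop := out = prepare_contrastive_samples_alt samples labels
instance (samples : List String) (labels : List Int) (out : Option (List String × List String)) : Decidable (Spec_prepare_contrastive_samples samples labels out) := by unfold Spec_prepare_contrastive_samples; infer_instance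

-- ===== CLAIM =====
def Claim_equal_prepare_contrastive_samples : Prop := ∀ (samples : List String) (labels : List Int), Dom_prepare_contrastive_samples samples labels → Pre_prepare_contrastive_samples samples labels → Spec_prepare_contrastive_samples samples labels (prepare_contrastive_samples samples labels)

-- ===== LEMMAS AND PROOFS =====

-- the single-pass partition fold equals A's two filter/map comprehensions
lemma fold_partition (xs : List (String × Int)) : ∀ (a b : List String),
    xs.foldl (fun (acc : List String × List String) p =>
        if p.2 == 1 then (acc.1 ++ [p.1], acc.2)
        else if p.2 == 0 then (acc.1, acc.2 ++ [p.1])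
        else acc) (a, b)
      = (a ++ (xs.filter (fun p => p.2 == 1)).map Prod.fst,
         b ++ (xs.filter (fun p => p.2 == 0)).map Prod.fst) := by
  induction xs with
  | nil => intro a b; simp
  | cons x xs ih =>
    intro a b
    by_cases h1 : x.2 = 1
    · simp only [List.foldl_cons, List.filter_cons, h1, if_pos, beq_self_eq_true]
      rw [ih]
      simp
    · by_cases h0 : x.2 = 0
      · have hb1 : (x.2 == 1) = false := by simp [h1]
        have hb0 : (x.2 == 0) = true := by simp [h0]
        simp only [List.foldl_cons, List.filter_cons, hb1, hb0, Bool.false_eq_true, ite_false, ite_true]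
        rw [ih]
        simp
      · have hb1 : (x.2 == 1) = false := by simp [h1]
        have hb0 : (x.2 == 0) = false := by simp [h0]
        simp only [List.foldl_cons, List.filter_cons, hb1, hb0, Bool.false_eq_true, ite_false]
        exact ih a b

lemma length_flatten_replicate (l : List String) (k : ℕ) :
    (List.flatten (List.replicate k l)).length = k * l.length := by
  induction k with
  | zero => simp
  | succ k ih => simp [List.replicate_succ, ih]; ring

lemma getD_flatten_replicate (l : List String) (k i : ℕ) (h : i < k * l.length) :
    (List.flatten (List.replicate k l)).getD i "" = l.getD (i % l.length) "" := by
  induction k generalizing i with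
  | zero => simp at h
  | succ k ih =>
    have hl : 0 < l.length := by
      by_contra h'
      have : l.length = 0 := by omega
      rw [this] at h; simp at h
    rw [List.replicate_succ, List.flatten_cons]
    by_cases hi : i < l.length
    · rw [List.getD_append _ _ _ _ hi, Nat.mod_eq_of_lt hi]
    · rw [not_lt] at hi
      have hdrop : (l ++ (List.replicate k l).flatten).getD i "" = ((List.replicate k l).flatten).getD (i - l.length) "" := by
        unfold List.getD
        rw [List.getElem?_append_right hi]
      rw [hdrop, ih (i - l.length) (by rw [Nat.succ_mul] at h; omega)]
      congr 1
      exact (Nat.mod_eq_sub_mod hi).symm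

lemma take_eq_range_map (xs : List String) (n : ℕ) (h : n ≤ xs.length) :
    xs.take n = (List.range n).map (fun i => xs.getD i "") := by
  apply List.ext_getElem
  · simp [h]
  · intro i h1 h2
    simp only [List.getElem_take, List.getElem_map, List.getElem_range]
    rw [List.getD_eq_getElem]

lemma pad_eq (l : List String) (hl : 0 < l.length) (n : ℕ) :
    ((List.replicate (n / l.length + 1) l).flatten).take n
      = (List.range n).map (fun i => l.getD (i % l.length) "") := by
  have hn : n ≤ (n / l.length + 1) * l.length := by
    have := Nat.div_add_mod n l.length
    have := Nat.mod_lt n hl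
    nlinarith
  rw [take_eq_range_map _ n (by rw [length_flatten_replicate]; exact hn)]
  apply List.map_congr_left
  intro i hi
  rw [List.mem_range] at hi
  exact getD_flatten_replicate l _ i (by omega)

lemma range_map_mod_self (l : List String) :
    (List.range l.length).map (fun i => l.getD (i % l.length) "") = l := by
  apply List.ext_getElem
  · simp
  · intro i h1 h2
    simp only [List.getElem_map, List.getElem_range]
    rw [Nat.mod_eq_of_lt h2, List.getD_eq_getElem]

-- invariant of the doubling loop: the result stays a cyclic extension of the base
lemma grow_cyclic (base : List String) (n : ℕ) :
    ∀ (m : ℕ) (l : List String), n - l.length ≤ m → l ≠ [] → base.length ∣ l.length →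
    (∀ i, i < l.length → l.getD i "" = base.getD (i % base.length) "") →
    n ≤ (growPCS n l).length ∧
      ∀ i, i < (growPCS n l).length → (growPCS n l).getD i "" = base.getD (i % base.length) "" := by
  intro m
  induction m with
  | zero =>
    intro l hm hne hdvd hcyc
    have hlen : n ≤ l.length := by omega
    rw [growPCS, dif_neg (by omega)]
    exact ⟨hlen, hcyc⟩
  | succ m ih =>
    intro l hm hne hdvd hcyc
    by_cases hc : l.length < n ∧ l ≠ []
    · rw [growPCS, dif_pos hc]
      have hlp : 0 < l.length := List.length_pos_of_ne_nil hne
      have hll : (l ++ l).length = 2 * l.length := by simp [List.length_append]; omega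
      refine ih (l ++ l) (by omega) (by simp [hne]) (by rw [hll]; exact Dvd.dvd.mul_left hdvd 2) ?_
      intro i hi
      rw [hll] at hi
      by_cases hil : i < l.length
      · have : (l ++ l).getD i "" = l.getD i "" := by
          unfold List.getD; rw [List.getElem?_append_left hil]
        rw [this]; exact hcyc i hil
      · rw [not_lt] at hil
        have : (l ++ l).getD i "" = l.getD (i - l.length) "" := by
          unfold List.getD; rw [List.getElem?_append_right hil]
        rw [this, hcyc (i - l.length) (by omega)]
        congr 1
        obtain ⟨c, hcv⟩ := hdvd
        have hie : i = (i - l.length) + base.length * c := by omega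
        conv_rhs => rw [hie]
        rw [Nat.add_mul_mod_self_left]
    · rw [growPCS, dif_neg hc]
      have : ¬ l.length < n := fun h => hc ⟨h, hne⟩
      exact ⟨by omega, hcyc⟩

lemma grow_take (l : List String) (hl : 0 < l.length) (n : ℕ) :
    (growPCS n l).take n = (List.range n).map (fun i => l.getD (i % l.length) "") := by
  obtain ⟨hlen, hcyc⟩ := grow_cyclic l n n l (Nat.sub_le _ _)
    (List.ne_nil_of_length_pos hl) dvd_rfl
    (fun i hi => by rw [Nat.mod_eq_of_lt hi])
  rw [take_eq_range_map _ n hlen]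
  apply List.map_congr_left
  intro i hi
  rw [List.mem_range] at hi
  exact hcyc i (by omega)

-- both replication strategies equal uniform cyclic padding to the max length
lemma core_pad (pos neg : List String) (hpp : 0 < pos.length) (hnp : 0 < neg.length) :
    (if pos.length > neg.length then
       some (pos, ((List.replicate (pos.length / neg.length + 1) neg).flatten).take pos.length)
     else if neg.length > pos.length then
       some (((List.replicate (neg.length / pos.length + 1) pos).flatten).take neg.length, neg)
     else some (pos, neg))
    = some ((growPCS (max pos.length neg.length) pos).take (max pos.length neg.length),
            (growPCS (max pos.length neg.length) neg).take (max pos.length neg.length)) := by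
  rw [grow_take pos hpp, grow_take neg hnp]
  rcases lt_trichotomy neg.length pos.length with h | h | h
  · rw [if_pos h, Nat.max_eq_left (le_of_lt h), pad_eq neg hnp, range_map_mod_self]
  · rw [if_neg (by omega), if_neg (by omega), Nat.max_eq_left (le_of_eq h)]
    rw [range_map_mod_self, ← h, range_map_mod_self]
  · rw [if_neg (by omega), if_pos h, Nat.max_eq_right (le_of_lt h), pad_eq pos hpp, range_map_mod_self]

-- ===== VERDICT =====
theorem prepare_contrastive_samples_spec : Claim_equal_prepare_contrastive_samples := by
  intro samples labels _ hpre
  have hne : ¬(samples.length ≠ labels.length) := fun h => h hpre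
  unfold Spec_prepare_contrastive_samples prepare_contrastive_samples prepare_contrastive_samples_alt
  rw [if_neg hne, if_neg hne, fold_partition]
  simp only [List.nil_append]
  have hnegB : (if ((samples.zip labels).filter (fun p => p.2 == 0)).map Prod.fst = [] then ["NA"]
       else ((samples.zip labels).filter (fun p => p.2 == 0)).map Prod.fst)
      = (if (((samples.zip labels).filter (fun p => p.2 == 0)).map Prod.fst).length = 0 then ["NA"]
       else ((samples.zip labels).filter (fun p => p.2 == 0)).map Prod.fst) := by
    by_cases h : ((samples.zip labels).filter (fun p => p.2 == 0)).map Prod.fst = []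
    · rw [if_pos h, if_pos (by rw [h]; rfl)]
    · rw [if_neg h, if_neg (fun hl => h (List.length_eq_zero_iff.1 hl))]
  rw [hnegB]
  set pos := ((samples.zip labels).filter (fun p => p.2 == 1)).map Prod.fst with hpos
  set neg0 := ((samples.zip labels).filter (fun p => p.2 == 0)).map Prod.fst with hneg0
  set neg := if neg0.length = 0 then ["NA"] else neg0 with hneg
  have hnp : 0 < neg.length := by
    rw [hneg]; split_ifs with h
    · simp
    · omega
  by_cases hp : pos = []
  · rw [if_pos hp, if_pos (by rw [hp]; rfl)]
  · have hp' : pos.length ≠ 0 := by simp [hp]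
    rw [if_neg hp', if_neg hp]
    exact core_pad pos neg (Nat.pos_of_ne_zero hp') hnp
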